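-- pv_equiv track=rewrite | github.com/expectopatronm/Paint-by-Numbers-Generator | paint_by_numbers_generic_v8_pdf.py | _levels_from_parents
-- ===== SOURCE A (Python) =====
-- def _levels_from_parents(parent: dict[int, int|None]) -> dict[int,int]:
--     lvl = {}
--     def rec(i):
--         if i in lvl: return lvl[i]
--         p = parent.get(i, None)
--         lvl[i] = 0 if p is None else 1 + rec(p)
--         return lvl[i]
--     for i in parent.keys():
--         rec(i)
--     return lvl
-- ===== SOURCE B (Python) =====
-- def _levels_from_parents(parent: dict[int, int|None]) -> dict[int,int]:
--     # Iterative: walk each unresolved node's ancestor chain up to a root or a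
--     # cached node, then assign levels back down the collected path.
--     lvl = {}
--     for i in parent.keys():
--         if i in lvl:
--             continue
--         path = [i]
--         while True:
--             p = parent.get(path[-1], None)
--             if p is None or p in lvl:
--                 break
--             path.append(p)
--         top = path[-1]
--         p = parent.get(top, None)
--         base = 0 if p is None else lvl[p] + 1
--         for node in reversed(path):
--             lvl[node] = base
--             base += 1
--     return lvl
-- ===== Notes on version B (the rewrite author's own statement) =====
-- stated objective: alternative
-- what changed: Replaces the memoized recursive helper with an iterative upward walk that collects the unresolved ancestor path and then assigns levels back down it, producing the same dict in the same insertion order without recursion.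
import Mathlib
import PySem

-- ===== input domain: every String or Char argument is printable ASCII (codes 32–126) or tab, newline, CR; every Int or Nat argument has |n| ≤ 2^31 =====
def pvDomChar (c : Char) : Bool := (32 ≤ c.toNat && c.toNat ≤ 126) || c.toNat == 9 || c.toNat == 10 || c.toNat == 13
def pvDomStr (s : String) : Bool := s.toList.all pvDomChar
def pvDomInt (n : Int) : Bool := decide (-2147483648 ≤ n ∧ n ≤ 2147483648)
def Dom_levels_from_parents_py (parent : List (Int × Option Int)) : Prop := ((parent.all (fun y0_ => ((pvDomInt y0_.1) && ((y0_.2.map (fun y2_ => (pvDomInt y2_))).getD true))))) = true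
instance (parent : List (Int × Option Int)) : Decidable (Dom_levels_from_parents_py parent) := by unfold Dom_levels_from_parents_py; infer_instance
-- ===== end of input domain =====

-- B replaces A's memoized recursion by an iterative walk up the ancestor path followed by
-- assigning levels back down it (no recursion); same dict, same insertion order.

-- parent.get(i, None): a missing key and a key stored with value None both yield None
def pvPGet (pd : PySem.Dict Int (Option Int)) (i : Int) : Option Int :=
  (PySem.Dict.get? pd i).getD none

-- ===== PORT A =====
-- rec(i) with memo table lvl; fuel bounds the recursion depth (Python raises
-- RecursionError on a cyclic chain; such inputs are outside Pre_).
def pvRecA (pd : PySem.Dict Int (Option Int)) : Nat → Int → PySem.Dict Int Int → PySem.Dict Int Int × Int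
  | fuel, i, lvl =>
    match PySem.Dict.get? lvl i with
    | some v => (lvl, v)
    | none =>
      match pvPGet pd i, fuel with
      | none, _ => (lvl.insert i 0, 0)
      | some _, 0 => (lvl, 0)            -- fuel exhausted: Python raises; unreachable under Pre_
      | some p, fuel'+1 =>
        let r := pvRecA pd fuel' p lvl
        (r.1.insert i (1 + r.2), 1 + r.2)

def levels_from_parents_py (parent : List (Int × Option Int)) : List (Int × Int) :=
  let pd := PySem.Dict.ofList parent
  ((PySem.Dict.keys pd).foldl (fun lvl i => (pvRecA pd (parent.length + 1) i lvl).1)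
    PySem.Dict.empty).items

-- ===== PORT B =====
-- the while loop of Source B: path is kept most-recent-first (so python's path[-1] is the
-- head and reversed(path) is the list itself); fuel bounds the walk (cycles: outside Pre_)
def pvExtendB (pd : PySem.Dict Int (Option Int)) : Nat → List Int → PySem.Dict Int Int → List Int
  | fuel, path, lvl =>
    match pvPGet pd (path.headD 0) with
    | none => path
    | some p =>
      if (PySem.Dict.get? lvl p).isSome then path
      else match fuel with
        | 0 => path                      -- Python's loop would not terminate; unreachable under Pre_
        | fuel'+1 => pvExtendB pd fuel' (p :: path) lvl

-- base = 0 if p is None else lvl[p] + 1  (p is cached whenever the walk stopped at it; getD totalizes)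
def pvBaseB (pd : PySem.Dict Int (Option Int)) (lvl : PySem.Dict Int Int) (top : Int) : Int :=
  match pvPGet pd top with
  | none => 0
  | some p => (PySem.Dict.get? lvl p).getD 0 + 1

-- for node in reversed(path): lvl[node] = base; base += 1
def pvAssignB : PySem.Dict Int Int → List Int → Int → PySem.Dict Int Int
  | lvl, [], _ => lvl
  | lvl, n :: rest, base => pvAssignB (lvl.insert n base) rest (base + 1)

def levels_from_parents_py_alt (parent : List (Int × Option Int)) : List (Int × Int) :=
  let pd := PySem.Dict.ofList parent
  ((PySem.Dict.keys pd).foldl (fun lvl i =>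
      if (PySem.Dict.get? lvl i).isSome then lvl
      else
        let path := pvExtendB pd (parent.length + 1) [i] lvl
        pvAssignB lvl path (pvBaseB pd lvl (path.headD 0)))
    PySem.Dict.empty).items

-- ===== PRECONDITION & SPEC =====
-- from i, following parents reaches a root (None / missing key) within fuel steps
def pvChainRoots (pd : PySem.Dict Int (Option Int)) : Nat → Int → Bool
  | fuel, i =>
    match pvPGet pd i with
    | none => true
    | some p => match fuel with | 0 => false | fuel'+1 => pvChainRoots pd fuel' p

-- Pre_ excludes cyclic parent maps: on those Python A raises RecursionError (and Python B loops);
-- on every acyclic map each chain reaches a root within |parent| + 1 steps.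
def Pre_levels_from_parents_py (parent : List (Int × Option Int)) : Prop :=
  ∀ i ∈ PySem.Dict.keys (PySem.Dict.ofList parent),
    pvChainRoots (PySem.Dict.ofList parent) (parent.length + 1) i = true

instance (parent : List (Int × Option Int)) : Decidable (Pre_levels_from_parents_py parent) := by
  unfold Pre_levels_from_parents_py; infer_instance

def pvWitness_levels_from_parents_py : (List (Int × Option Int)) :=
  [(1, none), (2, some 1), (3, some 2), (4, some 9)]

def Spec_levels_from_parents_py (parent : List (Int × Option Int)) (out : List (Int × Int)) : Prop := out = levels_from_parents_py_alt parent
instance (parent : List (Int × Option Int)) (out : List (Int × Int)) : Decidable (Spec_levels_from_parents_py parent out) := by unfold Spec_levels_from_parents_py; infer_instance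

-- ===== CLAIM (what is proved, stated in full; the proofs are below) =====
def Claim_equal_levels_from_parents_py : Prop := ∀ (parent : List (Int × Option Int)), Dom_levels_from_parents_py parent → Pre_levels_from_parents_py parent → Spec_levels_from_parents_py parent (levels_from_parents_py parent)

-- ===== LEMMAS AND PROOFS =====

-- the walk only ever inspects the head of the path: the tail is carried along
theorem pvExtendB_cons (pd : PySem.Dict Int (Option Int)) :
    ∀ (fuel : Nat) (p : Int) (path : List Int) (lvl : PySem.Dict Int Int),
      pvExtendB pd fuel (p :: path) lvl = pvExtendB pd fuel [p] lvl ++ path := by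
  intro fuel
  induction fuel with
  | zero =>
    intro p path lvl
    conv_lhs => rw [pvExtendB.eq_def]
    conv_rhs => rw [pvExtendB.eq_def]
    simp only [List.headD_cons]
    cases hp : pvPGet pd p with
    | none => simp [hp]
    | some q =>
      cases h : (PySem.Dict.get? lvl q).isSome <;> simp [hp, h]
  | succ f ih =>
    intro p path lvl
    conv_lhs => rw [pvExtendB.eq_def]
    conv_rhs => rw [pvExtendB.eq_def]
    simp only [List.headD_cons]
    cases hp : pvPGet pd p with
    | none => simp [hp]
    | some q =>
      cases h : (PySem.Dict.get? lvl q).isSome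
      · simp only [hp, h, Bool.false_eq_true, if_false]
        rw [ih q (p :: path) lvl, ih q [p] lvl, List.append_assoc]
        simp
      · simp [hp, h]

theorem pvExtendB_ne_nil (pd : PySem.Dict Int (Option Int)) :
    ∀ (fuel : Nat) (p : Int) (path : List Int) (lvl : PySem.Dict Int Int),
      pvExtendB pd fuel (p :: path) lvl ≠ [] := by
  intro fuel
  induction fuel with
  | zero =>
    intro p path lvl
    conv_lhs => rw [pvExtendB.eq_def]
    simp only [List.headD_cons]
    cases hp : pvPGet pd p with
    | none => simp [hp]
    | some q => cases h : (PySem.Dict.get? lvl q).isSome <;> simp [hp, h]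
  | succ f ih =>
    intro p path lvl
    conv_lhs => rw [pvExtendB.eq_def]
    simp only [List.headD_cons]
    cases hp : pvPGet pd p with
    | none => simp [hp]
    | some q =>
      cases h : (PySem.Dict.get? lvl q).isSome
      · simp only [hp, h, Bool.false_eq_true, if_false]
        exact ih q (p :: path) lvl
      · simp [hp, h]

theorem pvAssignB_append (n : Int) :
    ∀ (xs : List Int) (lvl : PySem.Dict Int Int) (base : Int),
      pvAssignB lvl (xs ++ [n]) base
        = (pvAssignB lvl xs base).insert n (base + xs.length) := by
  intro xs
  induction xs with
  | nil => intro lvl base; simp [pvAssignB]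
  | cons x rest ih =>
    intro lvl base
    simp only [List.cons_append, pvAssignB, ih, List.length_cons]
    congr 1
    push_cast
    ring

theorem pvChainRoots_zero (pd : PySem.Dict Int (Option Int)) (i : Int)
    (h : pvChainRoots pd 0 i = true) : pvPGet pd i = none := by
  cases hp : pvPGet pd i with
  | none => rfl
  | some q => rw [pvChainRoots.eq_def] at h; simp [hp] at h

theorem pvChainRoots_succ (pd : PySem.Dict Int (Option Int)) (f : Nat) (i q : Int)
    (h : pvChainRoots pd (f + 1) i = true) (hp : pvPGet pd i = some q) :
    pvChainRoots pd f q = true := by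
  rw [pvChainRoots.eq_def] at h
  simp only [hp] at h
  exact h

-- the core correspondence: one call of A's rec equals B's walk-then-assign, and the
-- value it returns is base + |path| - 1
theorem pvRecA_eq_walk (pd : PySem.Dict Int (Option Int)) :
    ∀ (fuel : Nat) (i : Int) (lvl : PySem.Dict Int Int),
      PySem.Dict.get? lvl i = none →
      pvChainRoots pd fuel i = true →
      pvRecA pd fuel i lvl
        = (pvAssignB lvl (pvExtendB pd fuel [i] lvl)
             (pvBaseB pd lvl ((pvExtendB pd fuel [i] lvl).headD 0)),
           pvBaseB pd lvl ((pvExtendB pd fuel [i] lvl).headD 0)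
             + ((pvExtendB pd fuel [i] lvl).length : Int) - 1) := by
  intro fuel
  induction fuel with
  | zero =>
    intro i lvl hmem hchain
    cases hp : pvPGet pd i with
    | some q =>
      have hz := pvChainRoots_zero pd i hchain
      rw [hp] at hz; cases hz
    | none =>
      have hext : pvExtendB pd 0 [i] lvl = [i] := by
        rw [pvExtendB.eq_def]; simp [hp]
      conv_lhs => rw [pvRecA.eq_def]
      rw [hext]
      simp [hmem, hp, pvBaseB, pvAssignB]
  | succ f ih =>
    intro i lvl hmem hchain
    cases hp : pvPGet pd i with
    | none =>
      have hext : pvExtendB pd (f + 1) [i] lvl = [i] := by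
        conv_lhs => rw [pvExtendB.eq_def]
        simp [hp]
      conv_lhs => rw [pvRecA.eq_def]
      rw [hext]
      simp [hmem, hp, pvBaseB, pvAssignB]
    | some q =>
      have hchain2 := pvChainRoots_succ pd f i q hchain hp
      cases hq : PySem.Dict.get? lvl q with
      | some v =>
        have hext : pvExtendB pd (f + 1) [i] lvl = [i] := by
          conv_lhs => rw [pvExtendB.eq_def]
          simp [hp, hq]
        have hr : pvRecA pd f q lvl = (lvl, v) := by
          conv_lhs => rw [pvRecA.eq_def]
          simp [hq]
        conv_lhs => rw [pvRecA.eq_def]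
        rw [hext]
        simp only [hmem, hp, hr, List.headD_cons, pvBaseB, hq, pvAssignB,
          Option.getD_some, List.length_cons, List.length_nil]
        rw [Prod.mk.injEq]
        refine ⟨by congr 1; push_cast; ring, by push_cast; ring⟩
      | none =>
        have hext : pvExtendB pd (f + 1) [i] lvl = pvExtendB pd f [q] lvl ++ [i] := by
          conv_lhs => rw [pvExtendB.eq_def]
          simp only [List.headD_cons, hp, hq, Option.isSome_none, Bool.false_eq_true, if_false]
          exact pvExtendB_cons pd f q [i] lvl
        have hrec := ih q lvl hq hchain2
        conv_lhs => rw [pvRecA.eq_def]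
        rw [hext]
        simp only [hmem, hp, hq, hrec]
        have hne := pvExtendB_ne_nil pd f q [] lvl
        set P := pvExtendB pd f [q] lvl with hP
        have hhead : (P ++ [i]).headD 0 = P.headD 0 := by
          obtain ⟨a, t, hPc⟩ := List.exists_cons_of_ne_nil hne
          rw [hPc]; simp
        rw [hhead, pvAssignB_append]
        rw [Prod.mk.injEq]
        refine ⟨by congr 1; push_cast; ring, ?_⟩
        simp only [List.length_append, List.length_cons, List.length_nil]
        push_cast; ring

-- one step of the two top-level loops agrees on every key with a rooted chain
theorem pvStep_eq (pd : PySem.Dict Int (Option Int)) (fuel : Nat) (i : Int)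
    (lvl : PySem.Dict Int Int) (hchain : pvChainRoots pd fuel i = true) :
    (pvRecA pd fuel i lvl).1
      = (if (PySem.Dict.get? lvl i).isSome then lvl
         else
           let path := pvExtendB pd fuel [i] lvl
           pvAssignB lvl path (pvBaseB pd lvl (path.headD 0))) := by
  cases hm : PySem.Dict.get? lvl i with
  | some v =>
    conv_lhs => rw [pvRecA.eq_def]
    simp [hm]
  | none =>
    rw [pvRecA_eq_walk pd fuel i lvl hm hchain]
    simp [hm]

theorem foldl_step_congr {α β : Type} (f g : β → α → β) :
    ∀ (l : List α) (b : β), (∀ x ∈ l, ∀ acc, f acc x = g acc x) →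
      l.foldl f b = l.foldl g b := by
  intro l
  induction l with
  | nil => intro b _; rfl
  | cons x xs ih =>
    intro b h
    simp only [List.foldl_cons]
    rw [h x (by simp) b]
    exact ih _ (fun y hy acc => h y (by simp [hy]) acc)

-- ===== VERDICT (by name: the statement is the Claim_ definition above) =====
theorem levels_from_parents_py_spec : Claim_equal_levels_from_parents_py := by
  intro parent _ hpre
  show levels_from_parents_py parent = levels_from_parents_py_alt parent
  unfold levels_from_parents_py levels_from_parents_py_alt
  exact congrArg PySem.Dict.items
    (foldl_step_congr _ _ _ _
      (fun i hi lvl => pvStep_eq (PySem.Dict.ofList parent) (parent.length + 1) i lvl (hpre i hi)))
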